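-- pv_equiv track=rewrite | github.com/egraphs-good/egglog-python | python/exp/param_eq_paper/generate_haskell_golden.py | _normalize_haskell_pretty
-- ===== SOURCE A (Python) =====
-- def _normalize_haskell_pretty(expr: str) -> str:
--     replacements = {
--         "Log(": "log(",
--         "Exp(": "exp(",
--         "Sqrt(": "sqrt(",
--         "Abs(": "abs(",
--         "^": "**",
--     }
--     normalized = expr
--     for old, new in replacements.items():
--         normalized = normalized.replace(old, new)
--     return normalized
-- ===== SOURCE B (Python) =====
-- import re
--
-- _REPLACEMENTS = {
--     "Log(": "log(",
--     "Exp(": "exp(",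
--     "Sqrt(": "sqrt(",
--     "Abs(": "abs(",
--     "^": "**",
-- }
-- _PATTERN = re.compile("|".join(re.escape(k) for k in _REPLACEMENTS))
--
--
-- def _normalize_haskell_pretty(expr: str) -> str:
--     # One simultaneous left-to-right pass: the keys never occur in any
--     # replacement text, so this equals the five sequential str.replace passes.
--     return _PATTERN.sub(lambda m: _REPLACEMENTS[m.group(0)], expr)
-- ===== Notes on version B (the rewrite author's own statement) =====
-- stated objective: idiomatic
-- what changed: Replaces the five sequential str.replace passes with ONE simultaneous left-to-right substitution pass (a compiled regex alternation over the escaped keys with a dict-callback), correct because no key occurs in any replacement text.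
import Mathlib
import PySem

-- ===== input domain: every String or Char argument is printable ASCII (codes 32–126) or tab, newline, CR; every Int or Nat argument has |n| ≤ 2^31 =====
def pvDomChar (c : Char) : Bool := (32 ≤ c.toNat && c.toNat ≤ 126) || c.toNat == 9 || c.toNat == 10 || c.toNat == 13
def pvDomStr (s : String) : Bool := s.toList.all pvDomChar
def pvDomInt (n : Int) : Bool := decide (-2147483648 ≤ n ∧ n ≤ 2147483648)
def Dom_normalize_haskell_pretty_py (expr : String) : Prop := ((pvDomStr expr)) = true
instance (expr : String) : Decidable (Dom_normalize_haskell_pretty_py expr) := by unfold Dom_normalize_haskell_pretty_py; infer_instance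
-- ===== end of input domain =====

-- B replaces A's five sequential str.replace passes by one simultaneous left-to-right
-- substitution pass (idiomatic single-pass rewrite); no speed claim is made.

-- ===== PORT A =====
def normalize_haskell_pretty_py (expr : String) : String :=
  let replacements : PySem.Dict String String :=
    (((((PySem.Dict.empty.insert "Log(" "log(").insert "Exp(" "exp(").insert
        "Sqrt(" "sqrt(").insert "Abs(" "abs(").insert "^" "**")
  replacements.items.foldl
    (fun normalized kv => PySem.Str.replace normalized kv.1 kv.2) expr

-- ===== PORT B =====
-- B's single pass: at each position try the alternatives in the alternation's order
-- (as the compiled regex does), emit the replacement and skip the key, else copy one char.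
def pvScanSub : List Char → List Char
  | [] => []
  | c :: t =>
    if ['L','o','g','('].isPrefixOf (c :: t) then ['l','o','g','('] ++ pvScanSub (t.drop 3)
    else if ['E','x','p','('].isPrefixOf (c :: t) then ['e','x','p','('] ++ pvScanSub (t.drop 3)
    else if ['S','q','r','t','('].isPrefixOf (c :: t) then ['s','q','r','t','('] ++ pvScanSub (t.drop 4)
    else if ['A','b','s','('].isPrefixOf (c :: t) then ['a','b','s','('] ++ pvScanSub (t.drop 3)
    else if c = '^' then '*' :: '*' :: pvScanSub t
    else c :: pvScanSub t
termination_by l => l.length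
decreasing_by all_goals simp

def normalize_haskell_pretty_py_alt (expr : String) : String :=
  String.ofList (pvScanSub expr.toList)

-- ===== PRECONDITION & SPEC =====
def Spec_normalize_haskell_pretty_py (expr : String) (out : String) : Prop := out = normalize_haskell_pretty_py_alt expr
instance (expr : String) (out : String) : Decidable (Spec_normalize_haskell_pretty_py expr out) := by unfold Spec_normalize_haskell_pretty_py; infer_instance

-- ===== CLAIM (what is proved, stated in full; the proofs are below) =====
def Claim_equal_normalize_haskell_pretty_py : Prop := ∀ (expr : String), Dom_normalize_haskell_pretty_py expr → Spec_normalize_haskell_pretty_py expr (normalize_haskell_pretty_py expr)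

-- ===== LEMMAS AND PROOFS =====

-- Accumulator/fuel bookkeeping for PySem.Chars.replace.go: any sufficient fuel gives the
-- same result, and the accumulator factors out.
theorem pv_go_acc (old new : List Char) (hold : old ≠ []) :
    ∀ n (l : List Char) (fuel₁ fuel₂ : Nat) (acc : List Char),
      l.length ≤ n → l.length ≤ fuel₁ → l.length ≤ fuel₂ →
      PySem.Chars.replace.go old new fuel₁ l acc
        = acc.reverse ++ PySem.Chars.replace.go old new fuel₂ l [] := by
  intro n
  induction n with
  | zero =>
    intro l fuel₁ fuel₂ acc h0 h1 h2
    have hl : l = [] := List.eq_nil_of_length_eq_zero (Nat.le_zero.1 h0)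
    subst hl
    cases fuel₁ <;> cases fuel₂ <;> rw [PySem.Chars.replace.go, PySem.Chars.replace.go] <;> simp
  | succ n ih =>
    intro l fuel₁ fuel₂ acc h0 h1 h2
    cases l with
    | nil =>
      cases fuel₁ <;> cases fuel₂ <;> rw [PySem.Chars.replace.go, PySem.Chars.replace.go] <;> simp
    | cons c t =>
      obtain ⟨f₁, rfl⟩ : ∃ f₁, fuel₁ = f₁ + 1 := ⟨fuel₁ - 1, by simp at h1; omega⟩
      obtain ⟨f₂, rfl⟩ : ∃ f₂, fuel₂ = f₂ + 1 := ⟨fuel₂ - 1, by simp at h2; omega⟩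
      rw [PySem.Chars.replace.go]
      conv_rhs => rw [PySem.Chars.replace.go]
      by_cases hp : old.isPrefixOf (c :: t) = true
      · simp only [hp, if_true]
        have holdlen : 1 ≤ old.length := by
          cases old with | nil => exact absurd rfl hold | cons _ _ => simp
        have hple : old.length ≤ (c :: t).length :=
          List.IsPrefix.length_le (List.isPrefixOf_iff_prefix.1 hp)
        have hdl : (List.drop old.length (c :: t)).length ≤ n := by
          simp at h0 ⊢; omega
        rw [ih _ f₁ (List.drop old.length (c :: t)).length _ hdl (by simp at h1 ⊢; omega) le_rfl,
            ih _ f₂ (List.drop old.length (c :: t)).length _ hdl (by simp at h2 ⊢; omega) le_rfl]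
        simp
      · simp only [hp]
        have ht : t.length ≤ n := by simp at h0; omega
        rw [ih t f₁ t.length _ ht (by simp at h1; omega) le_rfl,
            ih t f₂ t.length _ ht (by simp at h2; omega) le_rfl]
        simp

-- Recursive characterisation of PySem.Chars.replace for a nonempty pattern.
theorem pv_replace_nil (old new : List Char) (h : old ≠ []) :
    PySem.Chars.replace [] old new = [] := by
  rw [PySem.Chars.replace]
  simp [h]
  rw [PySem.Chars.replace.go]
  simp

theorem pv_replace_pos (old new l : List Char) (h0 : old ≠ []) (h : old <+: l) :
    PySem.Chars.replace l old new = new ++ PySem.Chars.replace (l.drop old.length) old new := by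
  have holdlen : 1 ≤ old.length := by
    cases old with | nil => exact absurd rfl h0 | cons _ _ => simp
  cases l with
  | nil =>
    exact absurd (List.eq_nil_of_prefix_nil h) h0
  | cons c t =>
    have hple := List.IsPrefix.length_le h
    rw [PySem.Chars.replace, PySem.Chars.replace]
    simp only [List.isEmpty_iff, h0, if_false]
    simp only [List.length_cons]
    rw [PySem.Chars.replace.go]
    simp only [List.isPrefixOf_iff_prefix.2 h, if_true]
    rw [pv_go_acc old new h0 ((c::t).drop old.length).length _ _ _ _ le_rfl
        (by simp at hple ⊢; omega) le_rfl]
    simp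

theorem pv_replace_neg (old new : List Char) (c : Char) (t : List Char) (h : ¬ old <+: (c :: t)) (h0 : old ≠ []) :
    PySem.Chars.replace (c :: t) old new = c :: PySem.Chars.replace t old new := by
  rw [PySem.Chars.replace, PySem.Chars.replace]
  simp only [List.isEmpty_iff, h0, if_false]
  simp only [List.length_cons]
  rw [PySem.Chars.replace.go]
  have hp : old.isPrefixOf (c :: t) = false := by
    rw [Bool.eq_false_iff]; intro hc; exact h (List.isPrefixOf_iff_prefix.1 hc)
  simp only [hp, Bool.false_eq_true, if_false]
  rw [pv_go_acc old new h0 t.length _ _ _ _ le_rfl (by simp) le_rfl]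
  simp

-- u and p are "incomparable all the way down u": no nonempty suffix of u is
-- prefix-comparable with p.
def pvIncmp (u p : List Char) : Prop :=
  (u.tails.all fun s => s.isEmpty || (!(s.isPrefixOf p) && !(p.isPrefixOf s))) = true

theorem pvIncmp_iff (u p : List Char) :
    pvIncmp u p ↔ ∀ s ∈ u.tails, s ≠ [] → ¬ s <+: p ∧ ¬ p <+: s := by
  unfold pvIncmp
  rw [List.all_eq_true]
  refine forall_congr' fun s => forall_congr' fun _ => ?_
  cases s with
  | nil => simp
  | cons a s' =>
    rw [show (a :: s').isEmpty = false from rfl]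
    simp only [Bool.false_or, Bool.and_eq_true, Bool.not_eq_true']
    constructor
    · rintro ⟨h1, h2⟩ -
      exact ⟨fun hc => by simp [List.isPrefixOf_iff_prefix.2 hc] at h1,
             fun hc => by simp [List.isPrefixOf_iff_prefix.2 hc] at h2⟩
    · rintro h
      obtain ⟨h1, h2⟩ := h (by simp)
      refine ⟨?_, ?_⟩ <;> rw [Bool.eq_false_iff] <;> intro hc
      · exact h1 (List.isPrefixOf_iff_prefix.1 hc)
      · exact h2 (List.isPrefixOf_iff_prefix.1 hc)

theorem pvIncmp_of_suffix {u' u p : List Char} (h : u' <:+ u) (hi : pvIncmp u p) : pvIncmp u' p :=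
  (pvIncmp_iff _ _).2 fun s hs hne =>
    (pvIncmp_iff _ _).1 hi s ((List.mem_tails _ _).2 (((List.mem_tails _ _).1 hs).trans h)) hne

-- replace passes unchanged over a block u that can never take part in a match.
theorem pv_replace_append (p q : List Char) (hp : p ≠ []) :
    ∀ u X : List Char, pvIncmp u p →
      PySem.Chars.replace (u ++ X) p q = u ++ PySem.Chars.replace X p q := by
  intro u
  induction u with
  | nil => intro X _; simp
  | cons d u' ih =>
    intro X hinc
    have hu := (pvIncmp_iff _ _).1 hinc (d :: u') ((List.mem_tails _ _).2 (List.suffix_refl _)) (by simp)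
    have hnp : ¬ p <+: (d :: u') ++ X := by
      intro hpre
      rcases List.prefix_or_prefix_of_prefix hpre (List.prefix_append (d :: u') X) with h1 | h2
      · exact hu.2 h1
      · exact hu.1 h2
    rw [List.cons_append, pv_replace_neg p q d (u' ++ X) (by rwa [← List.cons_append]) hp,
        ih X (pvIncmp_of_suffix (List.suffix_cons d u') hinc)]
    simp

-- a pattern tail v incomparable with the replacement text q cannot be created by replace.
theorem pv_prefix_transfer (p q : List Char) (hp : p ≠ []) :
    ∀ n (l v : List Char), l.length ≤ n → pvIncmp v q →
      v <+: PySem.Chars.replace l p q → v <+: l := by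
  intro n
  induction n with
  | zero =>
    intro l v h0 _ hpre
    have hl : l = [] := List.eq_nil_of_length_eq_zero (Nat.le_zero.1 h0)
    subst hl
    rwa [pv_replace_nil p q hp] at hpre
  | succ n ih =>
    intro l v h0 hinc hpre
    cases l with
    | nil => rwa [pv_replace_nil p q hp] at hpre
    | cons c t =>
      by_cases hmatch : p <+: (c :: t)
      · rw [pv_replace_pos p q (c :: t) hp hmatch] at hpre
        cases v with
        | nil => exact List.nil_prefix
        | cons d v' =>
          have hv := (pvIncmp_iff _ _).1 hinc (d :: v') ((List.mem_tails _ _).2 (List.suffix_refl _)) (by simp)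
          rcases List.prefix_or_prefix_of_prefix hpre (List.prefix_append q _) with h1 | h2
          · exact absurd h1 hv.1
          · exact absurd h2 hv.2
      · rw [pv_replace_neg p q c t hmatch hp] at hpre
        cases v with
        | nil => exact List.nil_prefix
        | cons d v' =>
          rw [List.cons_prefix_cons] at hpre
          obtain ⟨rfl, hv'⟩ := hpre
          have : v' <+: t :=
            ih t v' (by simp at h0; omega)
              (pvIncmp_of_suffix (List.suffix_cons d v') hinc) hv'
          exact List.cons_prefix_cons.2 ⟨rfl, this⟩

theorem pv_scan_none (c : Char) (t : List Char)
    (hL : ¬ ['L','o','g','('] <+: (c :: t)) (hE : ¬ ['E','x','p','('] <+: (c :: t))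
    (hS : ¬ ['S','q','r','t','('] <+: (c :: t)) (hA : ¬ ['A','b','s','('] <+: (c :: t))
    (hC : c ≠ '^') : pvScanSub (c :: t) = c :: pvScanSub t := by
  rw [pvScanSub]
  simp only [Bool.eq_false_iff.2 (fun h => hL (List.isPrefixOf_iff_prefix.1 h)),
    Bool.eq_false_iff.2 (fun h => hE (List.isPrefixOf_iff_prefix.1 h)),
    Bool.eq_false_iff.2 (fun h => hS (List.isPrefixOf_iff_prefix.1 h)),
    Bool.eq_false_iff.2 (fun h => hA (List.isPrefixOf_iff_prefix.1 h)),
    hC, Bool.false_eq_true, if_false]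

-- the five sequential passes equal the single simultaneous pass.
theorem pv_comp_eq_scan :
    ∀ n (cs : List Char), cs.length ≤ n →
      PySem.Chars.replace (PySem.Chars.replace (PySem.Chars.replace (PySem.Chars.replace
        (PySem.Chars.replace cs ['L','o','g','('] ['l','o','g','('])
        ['E','x','p','('] ['e','x','p','('])
        ['S','q','r','t','('] ['s','q','r','t','('])
        ['A','b','s','('] ['a','b','s','('])
        ['^'] ['*','*'] = pvScanSub cs := by
  intro n
  induction n with
  | zero =>
    intro cs h0
    have hcs : cs = [] := List.eq_nil_of_length_eq_zero (Nat.le_zero.1 h0)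
    subst hcs
    rw [pv_replace_nil _ _ (by simp), pv_replace_nil _ _ (by simp), pv_replace_nil _ _ (by simp),
        pv_replace_nil _ _ (by simp), pv_replace_nil _ _ (by simp), pvScanSub]
  | succ n ih =>
    intro cs h0
    cases cs with
    | nil =>
      rw [pv_replace_nil _ _ (by simp), pv_replace_nil _ _ (by simp), pv_replace_nil _ _ (by simp),
          pv_replace_nil _ _ (by simp), pv_replace_nil _ _ (by simp), pvScanSub]
    | cons c t =>
      by_cases hL : ['L','o','g','('] <+: (c :: t)
      · obtain ⟨X, hX⟩ := hL
        rw [← hX]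
        rw [pv_replace_pos _ _ _ (by simp) (List.prefix_append _ _), List.drop_left,
            pv_replace_append ['E','x','p','('] ['e','x','p','('] (by simp) ['l','o','g','('] _ (by unfold pvIncmp; decide),
            pv_replace_append ['S','q','r','t','('] ['s','q','r','t','('] (by simp) ['l','o','g','('] _ (by unfold pvIncmp; decide),
            pv_replace_append ['A','b','s','('] ['a','b','s','('] (by simp) ['l','o','g','('] _ (by unfold pvIncmp; decide),
            pv_replace_append ['^'] ['*','*'] (by simp) ['l','o','g','('] _ (by unfold pvIncmp; decide)]
        rw [show (['L','o','g','('] : List Char) ++ X = 'L'::'o'::'g'::'('::X from rfl, pvScanSub]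
        have hXlen : X.length ≤ n := by
          have := congrArg List.length hX; simp at this h0; omega
        rw [ih X hXlen]
        simp [List.isPrefixOf]
      · by_cases hE : ['E','x','p','('] <+: (c :: t)
        · obtain ⟨X, hX⟩ := hE
          rw [← hX]
          rw [pv_replace_append ['L','o','g','('] ['l','o','g','('] (by simp) ['E','x','p','('] _ (by unfold pvIncmp; decide),
              pv_replace_pos _ _ _ (by simp) (List.prefix_append _ _), List.drop_left,
              pv_replace_append ['S','q','r','t','('] ['s','q','r','t','('] (by simp) ['e','x','p','('] _ (by unfold pvIncmp; decide),
              pv_replace_append ['A','b','s','('] ['a','b','s','('] (by simp) ['e','x','p','('] _ (by unfold pvIncmp; decide),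
              pv_replace_append ['^'] ['*','*'] (by simp) ['e','x','p','('] _ (by unfold pvIncmp; decide)]
          rw [show (['E','x','p','('] : List Char) ++ X = 'E'::'x'::'p'::'('::X from rfl, pvScanSub]
          have hXlen : X.length ≤ n := by
            have := congrArg List.length hX; simp at this h0; omega
          rw [ih X hXlen]
          simp [List.isPrefixOf]
        · by_cases hS : ['S','q','r','t','('] <+: (c :: t)
          · obtain ⟨X, hX⟩ := hS
            rw [← hX]
            rw [pv_replace_append ['L','o','g','('] ['l','o','g','('] (by simp) ['S','q','r','t','('] _ (by unfold pvIncmp; decide),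
                pv_replace_append ['E','x','p','('] ['e','x','p','('] (by simp) ['S','q','r','t','('] _ (by unfold pvIncmp; decide),
                pv_replace_pos _ _ _ (by simp) (List.prefix_append _ _), List.drop_left,
                pv_replace_append ['A','b','s','('] ['a','b','s','('] (by simp) ['s','q','r','t','('] _ (by unfold pvIncmp; decide),
                pv_replace_append ['^'] ['*','*'] (by simp) ['s','q','r','t','('] _ (by unfold pvIncmp; decide)]
            rw [show (['S','q','r','t','('] : List Char) ++ X = 'S'::'q'::'r'::'t'::'('::X from rfl, pvScanSub]
            have hXlen : X.length ≤ n := by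
              have := congrArg List.length hX; simp at this h0; omega
            rw [ih X hXlen]
            simp [List.isPrefixOf]
          · by_cases hA : ['A','b','s','('] <+: (c :: t)
            · obtain ⟨X, hX⟩ := hA
              rw [← hX]
              rw [pv_replace_append ['L','o','g','('] ['l','o','g','('] (by simp) ['A','b','s','('] _ (by unfold pvIncmp; decide),
                  pv_replace_append ['E','x','p','('] ['e','x','p','('] (by simp) ['A','b','s','('] _ (by unfold pvIncmp; decide),
                  pv_replace_append ['S','q','r','t','('] ['s','q','r','t','('] (by simp) ['A','b','s','('] _ (by unfold pvIncmp; decide),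
                  pv_replace_pos _ _ _ (by simp) (List.prefix_append _ _), List.drop_left,
                  pv_replace_append ['^'] ['*','*'] (by simp) ['a','b','s','('] _ (by unfold pvIncmp; decide)]
              rw [show (['A','b','s','('] : List Char) ++ X = 'A'::'b'::'s'::'('::X from rfl, pvScanSub]
              have hXlen : X.length ≤ n := by
                have := congrArg List.length hX; simp at this h0; omega
              rw [ih X hXlen]
              simp [List.isPrefixOf]
            · by_cases hC : c = '^'
              · subst hC
                conv_lhs => rw [show ('^' :: t : List Char) = ['^'] ++ t from rfl]
                rw [pv_replace_append ['L','o','g','('] ['l','o','g','('] (by simp) ['^'] _ (by unfold pvIncmp; decide),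
                    pv_replace_append ['E','x','p','('] ['e','x','p','('] (by simp) ['^'] _ (by unfold pvIncmp; decide),
                    pv_replace_append ['S','q','r','t','('] ['s','q','r','t','('] (by simp) ['^'] _ (by unfold pvIncmp; decide),
                    pv_replace_append ['A','b','s','('] ['a','b','s','('] (by simp) ['^'] _ (by unfold pvIncmp; decide),
                    pv_replace_pos _ _ _ (by simp) (List.prefix_append _ _), List.drop_left]
                rw [pvScanSub]
                have htlen : t.length ≤ n := by simp at h0; omega
                rw [ih t htlen]
                simp [List.isPrefixOf]
              · -- no alternative matches at this position: every pass copies c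
                have h1 : PySem.Chars.replace (c :: t) ['L','o','g','('] ['l','o','g','('] =
                    c :: PySem.Chars.replace t ['L','o','g','('] ['l','o','g','('] :=
                  pv_replace_neg _ _ _ _ hL (by simp)
                set Y1 := PySem.Chars.replace t ['L','o','g','('] ['l','o','g','('] with hY1
                have h2 : ¬ ['E','x','p','('] <+: (c :: Y1) := by
                  intro hpre
                  rw [List.cons_prefix_cons] at hpre
                  obtain ⟨rfl, hw⟩ := hpre
                  have := pv_prefix_transfer _ _ (by simp) t.length t ['x','p','('] le_rfl (by unfold pvIncmp; decide) hw
                  exact hE (List.cons_prefix_cons.2 ⟨rfl, this⟩)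
                have h2' : PySem.Chars.replace (c :: Y1) ['E','x','p','('] ['e','x','p','('] =
                    c :: PySem.Chars.replace Y1 ['E','x','p','('] ['e','x','p','('] :=
                  pv_replace_neg _ _ _ _ h2 (by simp)
                set Y2 := PySem.Chars.replace Y1 ['E','x','p','('] ['e','x','p','('] with hY2
                have h3 : ¬ ['S','q','r','t','('] <+: (c :: Y2) := by
                  intro hpre
                  rw [List.cons_prefix_cons] at hpre
                  obtain ⟨rfl, hw⟩ := hpre
                  have hw1 := pv_prefix_transfer _ _ (by simp) Y1.length Y1 ['q','r','t','('] le_rfl (by unfold pvIncmp; decide) hw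
                  have hw2 := pv_prefix_transfer _ _ (by simp) t.length t ['q','r','t','('] le_rfl (by unfold pvIncmp; decide) hw1
                  exact hS (List.cons_prefix_cons.2 ⟨rfl, hw2⟩)
                have h3' : PySem.Chars.replace (c :: Y2) ['S','q','r','t','('] ['s','q','r','t','('] =
                    c :: PySem.Chars.replace Y2 ['S','q','r','t','('] ['s','q','r','t','('] :=
                  pv_replace_neg _ _ _ _ h3 (by simp)
                set Y3 := PySem.Chars.replace Y2 ['S','q','r','t','('] ['s','q','r','t','('] with hY3
                have h4 : ¬ ['A','b','s','('] <+: (c :: Y3) := by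
                  intro hpre
                  rw [List.cons_prefix_cons] at hpre
                  obtain ⟨rfl, hw⟩ := hpre
                  have hw1 := pv_prefix_transfer _ _ (by simp) Y2.length Y2 ['b','s','('] le_rfl (by unfold pvIncmp; decide) hw
                  have hw2 := pv_prefix_transfer _ _ (by simp) Y1.length Y1 ['b','s','('] le_rfl (by unfold pvIncmp; decide) hw1
                  have hw3 := pv_prefix_transfer _ _ (by simp) t.length t ['b','s','('] le_rfl (by unfold pvIncmp; decide) hw2
                  exact hA (List.cons_prefix_cons.2 ⟨rfl, hw3⟩)
                have h4' : PySem.Chars.replace (c :: Y3) ['A','b','s','('] ['a','b','s','('] =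
                    c :: PySem.Chars.replace Y3 ['A','b','s','('] ['a','b','s','('] :=
                  pv_replace_neg _ _ _ _ h4 (by simp)
                set Y4 := PySem.Chars.replace Y3 ['A','b','s','('] ['a','b','s','('] with hY4
                have h5 : ¬ ['^'] <+: (c :: Y4) := by
                  intro hpre
                  rw [List.cons_prefix_cons] at hpre
                  exact hC hpre.1.symm
                have h5' : PySem.Chars.replace (c :: Y4) ['^'] ['*','*'] =
                    c :: PySem.Chars.replace Y4 ['^'] ['*','*'] :=
                  pv_replace_neg _ _ _ _ h5 (by simp)
                have htlen : t.length ≤ n := by simp at h0; omega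
                rw [h1, h2', h3', h4', h5', hY4, hY3, hY2, hY1, ih t htlen,
                    pv_scan_none c t hL hE hS hA hC]

-- ===== VERDICT (by name: the statement is the Claim_ definition above) =====
theorem normalize_haskell_pretty_py_spec : Claim_equal_normalize_haskell_pretty_py := by
  intro expr _
  unfold Spec_normalize_haskell_pretty_py normalize_haskell_pretty_py normalize_haskell_pretty_py_alt
  refine String.toList_inj.mp ?_
  have hitems : ((((((PySem.Dict.empty : PySem.Dict String String).insert "Log(" "log(").insert "Exp(" "exp(").insert "Sqrt(" "sqrt(").insert "Abs(" "abs(").insert "^" "**").items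
      = [("Log(", "log("), ("Exp(", "exp("), ("Sqrt(", "sqrt("), ("Abs(", "abs("), ("^", "**")] := rfl
  dsimp only
  rw [hitems]
  simp only [List.foldl]
  simp only [PySem.Str.toList_replace, String.toList_ofList]
  exact pv_comp_eq_scan expr.toList.length expr.toList le_rfl
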